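-- pv_equiv track=rewrite | github.com/alexcavadora/school-portfolio-lidia | reglas/ejercicio_2.py | solved
-- ===== SOURCE A (Python) =====
-- def solved(matrix):
--     """
--     Chequeo de solución, ignora la posición del hueco
--
--     Parameters
--     ----------
--     matrix : list
--         Contiene en listas los renglones de entrada.
--
--     Returns
--     -------
--     bool: True: está resuelto.
--           False: no está resuelto.
--
--     """
--     prev = 0
--     for i in matrix: #se comprueba que esté resuelto, al comprobar que los números siguan una secuencia ascendente
--         for j in i:
--             if j == 0:
--                 continue
--             if j != prev+1:
--                 return False
--             else:
--                 prev = j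
--     return True
-- ===== SOURCE B (Python) =====
-- def solved(matrix):
--     nonzero = [j for row in matrix for j in row if j != 0]
--     return nonzero == list(range(1, len(nonzero) + 1))
-- ===== Notes on version B (the rewrite author's own statement) =====
-- stated objective: simpler
-- what changed: The stateful prev-counter scan with early return is replaced by flattening the nonzero entries and comparing them against the canonical list 1..k in one equality check.
import Mathlib
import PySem

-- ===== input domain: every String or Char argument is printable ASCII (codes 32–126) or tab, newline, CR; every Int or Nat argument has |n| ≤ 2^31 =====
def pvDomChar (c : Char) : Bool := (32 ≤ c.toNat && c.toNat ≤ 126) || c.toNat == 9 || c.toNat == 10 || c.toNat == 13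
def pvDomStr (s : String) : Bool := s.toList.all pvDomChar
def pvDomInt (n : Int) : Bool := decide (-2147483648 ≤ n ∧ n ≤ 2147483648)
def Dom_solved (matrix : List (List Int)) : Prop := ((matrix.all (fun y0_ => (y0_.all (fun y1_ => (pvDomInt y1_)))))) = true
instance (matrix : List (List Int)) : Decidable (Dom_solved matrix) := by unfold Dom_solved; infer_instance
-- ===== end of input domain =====

-- ===== PORT A =====
-- B replaces A's stateful prev-counter scan by "collect nonzeros, compare to 1..k" (objective: simpler).
-- A's nested loop with early return: the inner row loop threads prev and signals 'return False' with none.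
def solvedRow (prev : Int) : List Int → Option Int
  | [] => some prev
  | j :: rest =>
    if j = 0 then solvedRow prev rest
    else if j ≠ prev + 1 then none
    else solvedRow j rest

def solvedRows (prev : Int) : List (List Int) → Bool
  | [] => true
  | i :: rest =>
    match solvedRow prev i with
    | none => false
    | some p => solvedRows p rest

def solved (matrix : List (List Int)) : Bool := solvedRows 0 matrix

-- ===== PORT B =====
def solved_alt (matrix : List (List Int)) : Bool :=
  let nonzero := matrix.flatMap (fun row => row.filter (fun j => j ≠ 0))
  decide (nonzero = PySem.List.pyRange 1 ((nonzero.length : Int) + 1) 1)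

-- ===== PRECONDITION & SPEC =====
def Spec_solved (matrix : List (List Int)) (out : Bool) : Prop := out = solved_alt matrix
instance (matrix : List (List Int)) (out : Bool) : Decidable (Spec_solved matrix out) := by unfold Spec_solved; infer_instance

-- ===== CLAIM (what is proved, stated in full; the proofs are below) =====
def Claim_equal_solved : Prop := ∀ (matrix : List (List Int)), Dom_solved matrix → Spec_solved matrix (solved matrix)

-- ===== LEMMAS AND PROOFS =====

-- the ascending-run check that both sides reduce to
def asc (p : Int) : List Int → Bool
  | [] => true
  | x :: xs => decide (x = p + 1) && asc x xs

-- canonical sequence p, p+1, … of length n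
def seqFrom (p : Int) : Nat → List Int
  | 0 => []
  | n + 1 => p :: seqFrom (p + 1) n

theorem gl_cons (x p : Int) (xs : List Int) :
    (x :: xs).getLast?.getD p = xs.getLast?.getD x := by
  rw [← List.getLastD_eq_getLast?, ← List.getLastD_eq_getLast?, List.getLastD_cons]

theorem solvedRow_char (l : List Int) : ∀ p : Int,
    solvedRow p l = if asc p (l.filter (fun j => j ≠ 0)) then some ((l.filter (fun j => j ≠ 0)).getLastD p) else none := by
  induction l with
  | nil => intro p; simp [solvedRow, asc]
  | cons j rest ih =>
    intro p
    by_cases h0 : j = 0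
    · subst h0; simpa [solvedRow] using ih p
    · by_cases hp : j = p + 1
      · subst hp
        simp [solvedRow, h0, asc, ih (p + 1), gl_cons]
      · simp [solvedRow, h0, hp, asc]

theorem asc_append (a : List Int) : ∀ (p : Int) (b : List Int),
    asc p (a ++ b) = (asc p a && asc (a.getLastD p) b) := by
  induction a with
  | nil => intro p b; simp [asc]
  | cons x xs ih =>
    intro p b
    simp [asc, ih x, gl_cons, Bool.and_assoc]

theorem solvedRows_char (m : List (List Int)) : ∀ p : Int,
    solvedRows p m = asc p (m.flatMap (fun row => row.filter (fun j => j ≠ 0))) := by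
  induction m with
  | nil => intro p; simp [solvedRows, asc]
  | cons i rest ih =>
    intro p
    rw [solvedRows, solvedRow_char, List.flatMap_cons, asc_append]
    by_cases h : asc p (List.filter (fun j => decide (j ≠ 0)) i) = true
    · rw [if_pos h, h, Bool.true_and]
      exact ih _
    · rw [if_neg h]
      rw [Bool.not_eq_true] at h
      rw [h, Bool.false_and]

theorem pyRange_seqFrom : ∀ (n : Nat) (a : Int),
    PySem.List.pyRange a (a + n) 1 = seqFrom a n := by
  intro n
  induction n with
  | zero => intro a; simp [seqFrom]
  | succ k ih =>
    intro a
    rw [PySem.List.pyRange_one_cons (by omega)]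
    have h : a + (↑(k + 1) : Int) = (a + 1) + (k : Int) := by push_cast; ring
    rw [h, ih (a + 1), seqFrom]

theorem asc_iff_seq (l : List Int) : ∀ p : Int,
    decide (l = seqFrom (p + 1) l.length) = asc p l := by
  induction l with
  | nil => intro p; simp [seqFrom, asc]
  | cons x xs ih =>
    intro p
    by_cases hx : x = p + 1
    · subst hx
      simp [seqFrom, asc, ← ih]
    · simp [seqFrom, asc, hx]

-- ===== VERDICT (by name: the statement is the Claim_ definition above) =====
theorem solved_spec : Claim_equal_solved := by
  intro matrix _
  unfold Spec_solved solved solved_alt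
  rw [solvedRows_char]
  generalize (List.flatMap (fun row => List.filter (fun j => decide (j ≠ 0)) row) matrix) = l
  show asc 0 l = decide (l = PySem.List.pyRange 1 ((l.length : Int) + 1) 1)
  have h2 : ((l.length : Int) + 1) = 1 + (l.length : Int) := by ring
  rw [h2, pyRange_seqFrom l.length 1]
  simpa using (asc_iff_seq l 0).symm
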